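-- pv_equiv track=rewrite | github.com/GraceVortex/okucenter | messaging/telegram_utils.py | create_inline_keyboard
-- ===== SOURCE A (Python) =====
-- def create_inline_keyboard(buttons):
--     """
--     Создает встроенную клавиатуру для Telegram сообщения.
--
--     Args:
--         buttons (list): Список кнопок в формате [{"text": "Текст", "callback_data": "data"}]
--
--     Returns:
--         dict: Объект reply_markup для Telegram API
--     """
--     keyboard = []
--     row = []
--
--     for i, button in enumerate(buttons):
--         # Добавляем по 2 кнопки в ряд
--         row.append(button)
--         if len(row) == 2 or i == len(buttons) - 1:
--             keyboard.append(row)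
--             row = []
--
--     return {
--         'inline_keyboard': keyboard
--     }
-- ===== SOURCE B (Python) =====
-- def create_inline_keyboard(buttons):
--     """Recursive slicing: peel off two buttons per row instead of a running row buffer."""
--     def chunks(bs):
--         if not bs:
--             return []
--         return [bs[:2]] + chunks(bs[2:])
--     return {'inline_keyboard': chunks(buttons)}
-- ===== Notes on version B (the rewrite author's own statement) =====
-- stated objective: simpler
-- what changed: Replaces the enumerate loop with a running row buffer and flush condition by a recursive decomposition that slices off the first two buttons per row.
import Mathlib
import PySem

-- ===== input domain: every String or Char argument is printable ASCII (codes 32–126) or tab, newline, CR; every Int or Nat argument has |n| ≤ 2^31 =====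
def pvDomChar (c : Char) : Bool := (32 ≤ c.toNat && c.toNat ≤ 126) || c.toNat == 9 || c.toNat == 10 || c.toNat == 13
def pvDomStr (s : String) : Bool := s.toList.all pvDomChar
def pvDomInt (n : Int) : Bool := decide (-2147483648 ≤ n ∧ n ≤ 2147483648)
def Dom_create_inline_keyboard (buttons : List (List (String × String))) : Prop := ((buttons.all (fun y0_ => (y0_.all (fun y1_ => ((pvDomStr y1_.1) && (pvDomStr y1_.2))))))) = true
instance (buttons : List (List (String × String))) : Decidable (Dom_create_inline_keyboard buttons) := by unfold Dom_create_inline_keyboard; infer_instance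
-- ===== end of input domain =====

-- B replaces A's running row-buffer-and-flush loop with a recursive decomposition slicing off two buttons per row (objective: simpler); same cost.


-- ===== PORT A =====
-- the 'for i, button in enumerate(buttons)' loop, carrying the state (keyboard, row) and the index i
def ciLoopA (n : Int) : List (List (String × String)) → Int → List (List (List (String × String))) → List (List (String × String)) → List (List (List (String × String)))
  | [], _, kb, _ => kb
  | button :: rest, i, kb, row =>
    let row' := row ++ [button]
    if row'.length = 2 ∨ i = n - 1 then ciLoopA n rest (i + 1) (kb ++ [row']) []
    else ciLoopA n rest (i + 1) kb row'

def create_inline_keyboard (buttons : List (List (String × String))) : List (String × List (List (List (String × String)))) :=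
  [("inline_keyboard", ciLoopA (buttons.length : Int) buttons 0 [] [])]

-- ===== PORT B =====
-- Source B's recursive chunks: [bs[:2]] + chunks(bs[2:])
def ciChunks : List (List (String × String)) → List (List (List (String × String)))
  | [] => []
  | l@(_ :: _) => PySem.List.slice l none (some 2) :: ciChunks (PySem.List.slice l (some 2) none)
  termination_by l => l.length
  decreasing_by simp_all [PySem.List.slice_from]

def create_inline_keyboard_alt (buttons : List (List (String × String))) : List (String × List (List (List (String × String)))) :=
  [("inline_keyboard", ciChunks buttons)]

-- ===== PRECONDITION & SPEC =====
def Spec_create_inline_keyboard (buttons : List (List (String × String))) (out : List (String × List (List (List (String × String))))) : Prop := out = create_inline_keyboard_alt buttons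
instance (buttons : List (List (String × String))) (out : List (String × List (List (List (String × String))))) : Decidable (Spec_create_inline_keyboard buttons out) := by unfold Spec_create_inline_keyboard; infer_instance

-- ===== CLAIM (what is proved, stated in full; the proofs are below) =====
def Claim_equal_create_inline_keyboard : Prop := ∀ (buttons : List (List (String × String))), Dom_create_inline_keyboard buttons → Spec_create_inline_keyboard buttons (create_inline_keyboard buttons)

-- ===== LEMMAS AND PROOFS =====

lemma ciChunks_nil : ciChunks [] = [] := by rw [ciChunks]

lemma ciChunks_cons (b : List (String × String)) (l : List (List (String × String))) :
    ciChunks (b :: l) = (b :: l).take 2 :: ciChunks (l.drop 1) := by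
  rw [ciChunks.eq_2]
  simp [PySem.List.slice_to, PySem.List.slice_from]

lemma ciLoopA_eq (m : Nat) : ∀ (l : List (List (String × String))), l.length = m →
    ∀ (kb : List (List (List (String × String)))) (i n : Int), n = i + l.length →
    ciLoopA n l i kb [] = kb ++ ciChunks l := by
  induction m using Nat.strong_induction_on with
  | _ m ih =>
    intro l hl kb i n hn
    match l with
    | [] => simp [ciLoopA, ciChunks_nil]
    | [b] =>
      rw [ciLoopA]
      simp only [List.nil_append, List.length_cons, List.length_nil]
      rw [if_pos (by right; simp at hn; omega)]
      rw [ciLoopA, ciChunks_cons]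
      simp [ciChunks_nil]
    | b :: c :: rest =>
      rw [ciLoopA]
      simp only [List.nil_append, List.length_cons]
      rw [if_neg (by simp at hn ⊢; omega)]
      rw [ciLoopA]
      simp only [List.length_append, List.length_cons, List.length_nil]
      rw [if_pos (by left; simp)]
      rw [ih rest.length (by simp at hl; omega) rest rfl (kb ++ [[b] ++ [c]]) (i + 1 + 1) n (by simp at hn ⊢; omega)]
      rw [ciChunks_cons]
      simp

-- ===== VERDICT (by name: the statement is the Claim_ definition above) =====
theorem create_inline_keyboard_spec : Claim_equal_create_inline_keyboard := by
  intro buttons _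
  unfold Spec_create_inline_keyboard create_inline_keyboard create_inline_keyboard_alt
  rw [ciLoopA_eq buttons.length buttons rfl [] 0 buttons.length (by omega)]
  simp
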